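-- pv_equiv track=rewrite | github.com/CODE-U-S/Coding_Test_Study | 2st/Yeonwoo/왼쪽 오른쪽.py | solution
-- ===== SOURCE A (Python) =====
-- def solution(str_list):
--     answer = []
--     for i in range(len(str_list)):
--         if str_list[i]=='l':
--             answer = str_list[:i]
--             break
--         elif str_list[i]=='r':
--             answer = str_list[i+1:]
--             break
--     return answer
-- ===== SOURCE B (Python) =====
-- def solution(str_list):
--     n = len(str_list)
--     l_idx = str_list.index('l') if 'l' in str_list else n + 1
--     r_idx = str_list.index('r') if 'r' in str_list else n + 1
--     if l_idx < r_idx: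
--         return str_list[:l_idx]
--     if r_idx < l_idx:
--         return str_list[r_idx + 1:]
--     return []
-- ===== Notes on version B (the rewrite author's own statement) =====
-- stated objective: alternative
-- what changed: Instead of A's single interleaved scan with break, B locates the first positions of 'l' and 'r' independently (defaulting a missing landmark past the end) and then does one comparison and one slice.
import Mathlib
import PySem

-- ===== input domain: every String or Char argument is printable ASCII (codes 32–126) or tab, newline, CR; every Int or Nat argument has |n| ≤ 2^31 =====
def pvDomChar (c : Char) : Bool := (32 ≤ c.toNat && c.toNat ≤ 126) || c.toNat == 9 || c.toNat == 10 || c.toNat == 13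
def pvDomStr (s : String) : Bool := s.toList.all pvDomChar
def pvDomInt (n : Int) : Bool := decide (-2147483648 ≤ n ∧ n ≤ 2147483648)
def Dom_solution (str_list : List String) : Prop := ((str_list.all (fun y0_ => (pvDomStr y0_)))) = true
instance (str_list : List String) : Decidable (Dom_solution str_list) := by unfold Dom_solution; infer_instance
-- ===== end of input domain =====

-- B replaces A's interleaved scan-with-break by locating the first 'l' and first 'r' independently and doing one comparison and one slice (objective: alternative decomposition).

-- ===== PORT A =====
-- the for-loop with break: recursion on the index i; str_list[:i] / str_list[i+1:] with
-- 0 ≤ i < len are exactly List.take i / List.drop (i+1)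
def solutionLoop (str_list : List String) (i : Nat) : List String :=
  if h : i < str_list.length then
    if str_list[i] = "l" then str_list.take i
    else if str_list[i] = "r" then str_list.drop (i + 1)
    else solutionLoop str_list (i + 1)
  else []
termination_by str_list.length - i

def solution (str_list : List String) : List String := solutionLoop str_list 0

-- ===== PORT B =====
def solution_alt (str_list : List String) : List String :=
  let n := str_list.length
  let lIdx : Nat := if "l" ∈ str_list then (PySem.List.index? str_list "l").getD 0 else n + 1
  let rIdx : Nat := if "r" ∈ str_list then (PySem.List.index? str_list "r").getD 0 else n + 1
  if lIdx < rIdx then str_list.take lIdx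
  else if rIdx < lIdx then str_list.drop (rIdx + 1)
  else []

-- ===== PRECONDITION & SPEC =====
def Spec_solution (str_list : List String) (out : List String) : Prop := out = solution_alt str_list
instance (str_list : List String) (out : List String) : Decidable (Spec_solution str_list out) := by unfold Spec_solution; infer_instance

-- ===== CLAIM (what is proved, stated in full; the proofs are below) =====
def Claim_equal_solution : Prop := ∀ (str_list : List String), Dom_solution str_list → Spec_solution str_list (solution str_list)

-- ===== LEMMAS AND PROOFS =====

-- first occurrence of v in pre ++ v :: suf when v ∉ pre
theorem index?_middle {v : String} (pre suf : List String) (h : v ∉ pre) :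
    PySem.List.index? (pre ++ v :: suf) v = some pre.length := by
  rw [PySem.List.index?_eq_some_iff]
  exact ⟨pre, suf, rfl, rfl, h⟩

-- if v does not occur in pre and differs from the element at position pre.length,
-- any occurrence of v in pre ++ x :: suf is strictly past pre.length
theorem index?_gt {v x : String} (pre suf : List String) (hpre : v ∉ pre) (hx : x ≠ v)
    {k : Nat} (hk : PySem.List.index? (pre ++ x :: suf) v = some k) : pre.length < k := by
  obtain ⟨hlt, hget, _⟩ := PySem.List.getElem_of_index?_eq_some hk
  by_contra hle
  have hle' : k ≤ pre.length := Nat.le_of_not_lt hle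
  rcases Nat.lt_or_ge k pre.length with h1 | h1
  · rw [List.getElem_append_left h1] at hget
    exact hpre (hget ▸ List.getElem_mem h1)
  · have hk_eq : k = pre.length := Nat.le_antisymm hle' h1
    subst hk_eq
    have : (pre ++ x :: suf)[pre.length]'hlt = x := by
      rw [List.getElem_append_right (Nat.le_refl _)]
      simp
    exact hx (this ▸ hget)

theorem key : ∀ (xs pre : List String), (∀ s ∈ pre, s ≠ "l" ∧ s ≠ "r") →
    solutionLoop (pre ++ xs) pre.length = solution_alt (pre ++ xs) := by
  intro xs
  induction xs with
  | nil =>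
    intro pre h
    rw [solutionLoop]
    have hl : "l" ∉ pre := fun hm => (h _ hm).1 rfl
    have hr : "r" ∉ pre := fun hm => (h _ hm).2 rfl
    simp only [List.append_nil]
    simp [solution_alt, hl, hr]
  | cons x xs' ih =>
    intro pre h
    have hlen : pre.length < (pre ++ x :: xs').length := by simp
    have hget : (pre ++ x :: xs')[pre.length]'hlen = x := by
      rw [List.getElem_append_right (Nat.le_refl _)]; simp
    have hlpre : "l" ∉ pre := fun hm => (h _ hm).1 rfl
    have hrpre : "r" ∉ pre := fun hm => (h _ hm).2 rfl
    rw [solutionLoop]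
    simp only [hlen, dite_true, hget]
    by_cases hxl : x = "l"
    · subst hxl
      have hlidx : PySem.List.index? (pre ++ "l" :: xs') "l" = some pre.length :=
        index?_middle pre xs' hlpre
      have hmem : "l" ∈ pre ++ "l" :: xs' := by simp
      have hlt : ∀ rIdx, rIdx = (if "r" ∈ pre ++ "l" :: xs' then (PySem.List.index? (pre ++ "l" :: xs') "r").getD 0 else (pre ++ "l" :: xs').length + 1) → pre.length < rIdx := by
        intro rIdx hr
        split_ifs at hr with hmr
        · have hs : (PySem.List.index? (pre ++ "l" :: xs') "r").isSome :=
            (PySem.List.index?_isSome_iff _ _).mpr hmr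
          obtain ⟨k, hk⟩ := Option.isSome_iff_exists.mp hs
          rw [hk, Option.getD_some] at hr
          subst hr
          exact index?_gt pre xs' hrpre (by decide) hk
        · subst hr; simp only [List.length_append, List.length_cons]; omega
      simp only [solution_alt, hmem, if_pos, hlidx, Option.getD_some]
      rw [if_pos (hlt _ rfl), List.take_left' rfl]
    · by_cases hxr : x = "r"
      · subst hxr
        simp only [if_neg (by decide : ("r" : String) ≠ "l")]
        have hridx : PySem.List.index? (pre ++ "r" :: xs') "r" = some pre.length :=
          index?_middle pre xs' hrpre
        have hmem : "r" ∈ pre ++ "r" :: xs' := by simp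
        have hlt : ∀ lIdx, lIdx = (if "l" ∈ pre ++ "r" :: xs' then (PySem.List.index? (pre ++ "r" :: xs') "l").getD 0 else (pre ++ "r" :: xs').length + 1) → pre.length < lIdx := by
          intro lIdx hl
          split_ifs at hl with hml
          · have hs : (PySem.List.index? (pre ++ "r" :: xs') "l").isSome :=
              (PySem.List.index?_isSome_iff _ _).mpr hml
            obtain ⟨k, hk⟩ := Option.isSome_iff_exists.mp hs
            rw [hk, Option.getD_some] at hl
            subst hl
            exact index?_gt pre xs' hlpre (by decide) hk
          · subst hl; simp only [List.length_append, List.length_cons]; omega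
        simp only [solution_alt, hmem, if_pos, hridx, Option.getD_some]
        rw [if_neg (by have := hlt _ rfl; omega), if_pos (hlt _ rfl)]
      · rw [if_neg hxl, if_neg hxr]
        have h' : ∀ s ∈ pre ++ [x], s ≠ "l" ∧ s ≠ "r" := by
          intro s hs
          rcases List.mem_append.mp hs with hs | hs
          · exact h s hs
          · simp at hs; subst hs; exact ⟨hxl, hxr⟩
        have := ih (pre ++ [x]) h'
        simpa using this

-- ===== VERDICT (by name: the statement is the Claim_ definition above) =====
theorem solution_spec : Claim_equal_solution := by
  intro l _
  unfold Spec_solution solution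
  have := key l [] (by simp)
  simpa using this
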